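-- pv_equiv track=rewrite | github.com/XiandaDu/WatAIOliver | machine_learning/ai_agents/agents/reporter_agent.py | _format_unresolved_issues
-- ===== SOURCE A (Python) =====
-- from typing import List, Dict, Any
--
-- def _format_unresolved_issues(critiques: List[Dict[str, Any]]) -> str:
--     """Format unresolved issues for deadlock transparency"""
--
--     if not critiques:
--         return "No specific unresolved issues documented."
--
--     # Group by severity for clear presentation
--     by_severity = {}
--     for critique in critiques:
--         severity = critique.get('severity', 'medium')
--         if severity not in by_severity:
--             by_severity[severity] = []
--         by_severity[severity].append(critique.get('description', 'No description'))
--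
--     formatted_issues = []
--     for severity in ['critical', 'high', 'medium', 'low']:
--         if severity in by_severity:
--             issues = by_severity[severity][:3]  # Limit per severity
--             formatted_issues.append(f"{severity.upper()} ISSUES:")
--             for issue in issues:
--                 formatted_issues.append(f"• {issue}")
--
--     return "\n".join(formatted_issues)
-- ===== SOURCE B (Python) =====
-- def _format_unresolved_issues(critiques):
--     if not critiques:
--         return "No specific unresolved issues documented."
--     lines = []
--     for severity in ['critical', 'high', 'medium', 'low']:
--         matching = [c.get('description', 'No description')
--                     for c in critiques
--                     if c.get('severity', 'medium') == severity][:3]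
--         if matching:
--             lines.append(f"{severity.upper()} ISSUES:")
--             for d in matching:
--                 lines.append(f"• {d}")
--     return "\n".join(lines)
-- ===== Notes on version B (the rewrite author's own statement) =====
-- stated objective: simpler
-- what changed: Drops the grouping dict entirely: for each of the four fixed severities B scans the input once with a filtered comprehension (capped at 3) and emits the section directly, instead of indexing all critiques into a dict first and then reading it back.
import Mathlib
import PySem

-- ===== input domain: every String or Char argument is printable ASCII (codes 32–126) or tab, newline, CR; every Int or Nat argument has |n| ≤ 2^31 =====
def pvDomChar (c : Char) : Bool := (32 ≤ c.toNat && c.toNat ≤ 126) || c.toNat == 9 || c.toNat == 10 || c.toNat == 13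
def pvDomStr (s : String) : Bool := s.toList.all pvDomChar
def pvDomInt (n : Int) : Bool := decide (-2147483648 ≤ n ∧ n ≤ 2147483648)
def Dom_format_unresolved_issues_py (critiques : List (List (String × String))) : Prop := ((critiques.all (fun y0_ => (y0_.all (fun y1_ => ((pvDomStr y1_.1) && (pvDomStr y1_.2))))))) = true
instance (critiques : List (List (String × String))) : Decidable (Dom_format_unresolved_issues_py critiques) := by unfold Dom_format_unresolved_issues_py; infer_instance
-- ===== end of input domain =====

-- B is the same task without the grouping dict: one filtered scan per fixed severity (simpler; not faster).

-- ===== PORT A =====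
-- shared helper: critique.get(k, dflt) on the association-list dict (first match)
def pvGet (c : List (String × String)) (k dflt : String) : String :=
  (PySem.Dict.mk c).getD k dflt

-- one iteration of A's grouping loop body
def pvAStep (d : PySem.Dict String (List String)) (critique : List (String × String)) :
    PySem.Dict String (List String) :=
  let severity := pvGet critique "severity" "medium"
  let d' := if d.contains severity then d else d.insert severity []
  d'.modify severity [] (fun l => l ++ [pvGet critique "description" "No description"])

def format_unresolved_issues_py (critiques : List (List (String × String))) : String :=
  if critiques = [] then "No specific unresolved issues documented."
  else
    let by_severity := critiques.foldl pvAStep PySem.Dict.empty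
    let formatted_issues := ["critical", "high", "medium", "low"].foldl
      (fun acc severity =>
        if by_severity.contains severity then
          let issues := PySem.List.slice (by_severity.getD severity []) none (some 3)
          let acc' := acc ++ [PySem.Str.upper severity ++ " ISSUES:"]
          issues.foldl (fun a issue => a ++ ["• " ++ issue]) acc'
        else acc) []
    PySem.Str.join "\n" formatted_issues

-- ===== PORT B =====
def format_unresolved_issues_py_alt (critiques : List (List (String × String))) : String :=
  if critiques = [] then "No specific unresolved issues documented."
  else
    let lines := ["critical", "high", "medium", "low"].foldl
      (fun acc severity =>
        let matching := PySem.List.slice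
          ((critiques.filter (fun c => pvGet c "severity" "medium" == severity)).map
            (fun c => pvGet c "description" "No description")) none (some 3)
        if matching = [] then acc
        else acc ++ [PySem.Str.upper severity ++ " ISSUES:"]
               ++ matching.map (fun d => "• " ++ d)) []
    PySem.Str.join "\n" lines

-- ===== PRECONDITION & SPEC =====
def Spec_format_unresolved_issues_py (critiques : List (List (String × String))) (out : String) : Prop := out = format_unresolved_issues_py_alt critiques
instance (critiques : List (List (String × String))) (out : String) : Decidable (Spec_format_unresolved_issues_py critiques out) := by unfold Spec_format_unresolved_issues_py; infer_instance

-- ===== CLAIM (what is proved, stated in full; the proofs are below) =====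
def Claim_equal_format_unresolved_issues_py : Prop := ∀ (critiques : List (List (String × String))), Dom_format_unresolved_issues_py critiques → Spec_format_unresolved_issues_py critiques (format_unresolved_issues_py critiques)

-- ===== LEMMAS AND PROOFS =====

-- A's grouping dict, read back at severity s, is exactly B's filter-then-map list.
theorem pvA_getD (l : List (List (String × String))) (d : PySem.Dict String (List String)) (s : String) :
    (l.foldl pvAStep d).getD s [] =
      d.getD s [] ++ (l.filter (fun c => pvGet c "severity" "medium" == s)).map
        (fun c => pvGet c "description" "No description") := by
  induction l generalizing d with
  | nil => simp
  | cons c t ih =>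
    rw [List.foldl_cons, ih]
    have hstep : (pvAStep d c).getD s [] =
        d.getD s [] ++ (if pvGet c "severity" "medium" == s then
          [pvGet c "description" "No description"] else []) := by
      unfold pvAStep
      rw [PySem.Dict.getD_modify]
      by_cases hs : s = pvGet c "severity" "medium"
      · rw [if_pos hs]
        have hb : (pvGet c "severity" "medium" == s) = true := by simp [hs]
        rw [hb, if_pos rfl]
        by_cases hc : d.contains (pvGet c "severity" "medium") = true
        · rw [if_pos hc, hs]
        · rw [if_neg hc, PySem.Dict.getD_insert_self, hs,
            PySem.Dict.getD_of_not_contains _ _ (by simpa using hc)]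
      · rw [if_neg hs]
        have hb : (pvGet c "severity" "medium" == s) = false := by
          simpa using fun h => hs h.symm
        rw [hb]
        by_cases hc : d.contains (pvGet c "severity" "medium") = true
        · rw [if_pos hc]; simp
        · rw [if_neg hc, PySem.Dict.getD_insert, if_neg hs]; simp
    rw [hstep, List.filter_cons]
    by_cases hp : (pvGet c "severity" "medium" == s) = true
    · simp [hp]
    · simp [Bool.of_not_eq_true hp]

theorem pvBeqComm (a b : String) : (a == b) = (b == a) := by
  cases h : a == b <;> cases h2 : b == a <;> simp_all

-- A's membership test equals "some critique has this severity".
theorem pvA_contains (l : List (List (String × String))) (d : PySem.Dict String (List String)) (s : String) :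
    (l.foldl pvAStep d).contains s =
      (d.contains s || l.any (fun c => pvGet c "severity" "medium" == s)) := by
  induction l generalizing d with
  | nil => simp
  | cons c t ih =>
    rw [List.foldl_cons, ih]
    have hstep : (pvAStep d c).contains s =
        ((pvGet c "severity" "medium" == s) || d.contains s) := by
      unfold pvAStep
      rw [PySem.Dict.contains_modify]
      by_cases hc : d.contains (pvGet c "severity" "medium") = true
      · rw [if_pos hc, pvBeqComm]
      · rw [if_neg hc, PySem.Dict.contains_insert, pvBeqComm]
        cases h : (pvGet c "severity" "medium" == s) <;> simp [h]
    rw [hstep, List.any_cons]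
    cases hp : (pvGet c "severity" "medium" == s) <;> cases hd : d.contains s <;> simp


-- A's inner bullet loop is an append of the mapped bullets.
theorem pvBullets (issues acc : List String) :
    issues.foldl (fun a issue => a ++ ["• " ++ issue]) acc
      = acc ++ issues.map (fun d => "• " ++ d) := by
  induction issues generalizing acc with
  | nil => simp
  | cons i t ih => simp [ih, List.append_assoc]

theorem pvSliceTake3 (xs : List String) : PySem.List.slice xs none (some 3) = xs.take 3 := by
  simpa using PySem.List.slice_to_natCast xs 3

theorem pvTake3_nil_iff (xs : List String) : xs.take 3 = [] ↔ xs = [] := by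
  cases xs <;> simp

-- ===== VERDICT (by name: the statement is the Claim_ definition above) =====
theorem format_unresolved_issues_py_spec : Claim_equal_format_unresolved_issues_py := by
  intro critiques _
  unfold Spec_format_unresolved_issues_py
  unfold format_unresolved_issues_py format_unresolved_issues_py_alt
  by_cases h : critiques = []
  · simp [h]
  · rw [if_neg h, if_neg h]
    congr 1
    have hsev : ∀ (acc : List String) (s : String),
        (if (critiques.foldl pvAStep PySem.Dict.empty).contains s then
          (PySem.List.slice ((critiques.foldl pvAStep PySem.Dict.empty).getD s []) none (some 3)).foldl
            (fun a issue => a ++ ["• " ++ issue]) (acc ++ [PySem.Str.upper s ++ " ISSUES:"])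
        else acc)
        =
        (if PySem.List.slice ((critiques.filter (fun c => pvGet c "severity" "medium" == s)).map
              (fun c => pvGet c "description" "No description")) none (some 3) = [] then acc
         else acc ++ [PySem.Str.upper s ++ " ISSUES:"]
              ++ (PySem.List.slice ((critiques.filter (fun c => pvGet c "severity" "medium" == s)).map
                   (fun c => pvGet c "description" "No description")) none (some 3)).map
                   (fun d => "• " ++ d)) := by
      intro acc s
      simp only [pvA_contains, pvA_getD, PySem.Dict.contains_empty, PySem.Dict.getD_empty,
        Bool.false_or, List.nil_append, pvSliceTake3, pvBullets]
      by_cases ha : critiques.any (fun c => pvGet c "severity" "medium" == s) = true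
      · rw [if_pos ha]
        have hf : (critiques.filter (fun c => pvGet c "severity" "medium" == s)) ≠ [] := by
          intro hnil
          rcases List.any_eq_true.mp ha with ⟨c, hc, hp⟩
          have : c ∈ critiques.filter (fun c => pvGet c "severity" "medium" == s) :=
            List.mem_filter.mpr ⟨hc, hp⟩
          simp [hnil] at this
        have hm : ((critiques.filter (fun c => pvGet c "severity" "medium" == s)).map
            (fun c => pvGet c "description" "No description")).take 3 ≠ [] := by
          simp only [ne_eq, pvTake3_nil_iff, List.map_eq_nil_iff]
          exact hf
        rw [if_neg hm, List.append_assoc]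
      · rw [if_neg ha]
        have hf : (critiques.filter (fun c => pvGet c "severity" "medium" == s)) = [] := by
          rw [List.filter_eq_nil_iff]
          intro c hc
          exact fun hp => ha (List.any_eq_true.mpr ⟨c, hc, hp⟩)
        rw [if_pos (by simp [hf])]
    simp only [List.foldl_cons, List.foldl_nil]
    rw [hsev, hsev, hsev, hsev]
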